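-- pv_equiv track=rewrite | github.com/GitMonsters/octotetrahedral-agi | re_arc_bench_solves/523bb86b.py | transform
-- ===== SOURCE A (Python) =====
-- def transform(grid):
--     import copy
--
--     rows = len(grid)
--     cols = len(grid[0])
--
--     # Find background color (most common)
--     from collections import Counter
--     flat = [c for row in grid for c in row]
--     bg_color = Counter(flat).most_common(1)[0][0]
--
--     # Find all marker positions (non-background)
--     markers = []
--     for r in range(rows):
--         for c in range(cols):
--             if grid[r][c] != bg_color:
--                 markers.append((r, c, grid[r][c]))
--
--     # Create output grid
--     output = copy.deepcopy(grid)
--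
--     # From each marker, draw diagonals in all 4 directions
--     directions = [(-1, -1), (-1, 1), (1, -1), (1, 1)]  # NW, NE, SW, SE
--
--     for mr, mc, marker_color in markers:
--         for dr, dc in directions:
--             r, c = mr + dr, mc + dc
--             while 0 <= r < rows and 0 <= c < cols:
--                 if output[r][c] == bg_color:  # Only fill background cells
--                     output[r][c] = 6  # Magenta
--                 r += dr
--                 c += dc
--
--     return output
-- ===== SOURCE B (Python) =====
-- def transform(grid):
--     from collections import Counter
--
--     rows = len(grid)
--     cols = len(grid[0])
--
--     # Find background color (most common)
--     flat = [c for row in grid for c in row]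
--     bg_color = Counter(flat).most_common(1)[0][0]
--
--     # Index the diagonals of all non-background cells in one scan
--     diag = set()   # r - c of every marker (NW-SE lines)
--     anti = set()   # r + c of every marker (NE-SW lines)
--     for r in range(rows):
--         for c in range(cols):
--             if grid[r][c] != bg_color:
--                 diag.add(r - c)
--                 anti.add(r + c)
--
--     # One sweep: a background cell becomes magenta iff it lies on an indexed diagonal
--     output = []
--     for r, row in enumerate(grid):
--         new = list(row)
--         for c in range(cols):
--             if new[c] == bg_color and (r - c in diag or r + c in anti):
--                 new[c] = 6
--         output.append(new)
--     return output
-- ===== Notes on version B (the rewrite author's own statement) =====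
-- stated objective: faster
-- what changed: Instead of walking four diagonal rays from every marker and mutating the grid cell by cell, B indexes each marker's two diagonal keys (r-c and r+c) into two sets in one scan and then does a single per-cell sweep that recolors a background cell iff one of its keys is in a set.
-- outside the precondition, e.g. on transform([]): A raises IndexError, B raises IndexError
import Mathlib
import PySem

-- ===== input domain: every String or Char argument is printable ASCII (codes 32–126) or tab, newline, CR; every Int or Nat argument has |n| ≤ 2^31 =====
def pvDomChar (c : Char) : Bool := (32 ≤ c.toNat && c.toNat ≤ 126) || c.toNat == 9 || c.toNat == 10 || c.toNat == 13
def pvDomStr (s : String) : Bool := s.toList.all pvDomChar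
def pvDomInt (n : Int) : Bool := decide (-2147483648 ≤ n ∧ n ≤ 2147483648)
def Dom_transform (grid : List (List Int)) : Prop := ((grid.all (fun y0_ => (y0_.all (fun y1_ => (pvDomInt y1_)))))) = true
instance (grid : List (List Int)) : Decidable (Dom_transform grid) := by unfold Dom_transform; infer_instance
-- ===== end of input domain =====

-- B replaces A's per-marker diagonal ray walks by two diagonal-key sets built in one scan
-- plus a single per-cell sweep (intended objective: faster — each cell is visited O(1) times; not timed here).


-- ===== PORT A =====
-- grid[r][c] for indices produced by range(rows)/range(cols); exact under Pre_ (r < len grid, c < len row)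
def pvCell (g : List (List Int)) (r c : Nat) : Int := (g.getD r []).getD c 0

-- Counter(flat).most_common(1)[0][0]: the FIRST key of maximal count (CPython's nlargest(1) is
-- max(items, key=count), and PySem.List.max? returns the first extremal element).  flat = []
-- (Python IndexError) is excluded by Pre_; the 0 there is junk.  This background-detection code is
-- identical in A and B, so both ports share this helper.
def bgOf (grid : List (List Int)) : Int :=
  match PySem.List.max? (PySem.Dict.counter grid.flatten).items (fun kv => kv.2) with
  | some kv => kv.1
  | none => 0

def pvMarkers (grid : List (List Int)) (bg : Int) (rows cols : Nat) : List (Nat × Nat × Int) :=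
  (List.range rows).foldl (fun acc r =>
    (List.range cols).foldl (fun acc c =>
      if pvCell grid r c ≠ bg then acc ++ [(r, c, pvCell grid r c)] else acc) acc) []

def pvDirs : List (Int × Int) := [(-1, -1), (-1, 1), (1, -1), (1, 1)]

-- the 'while 0 <= r < rows and 0 <= c < cols' ray walk; fuel rows + cols is an upper bound on the
-- number of iterations (r takes distinct values in [0, rows) along the ray), so the recursion is exact
def pvWalk (bg : Int) (rows cols : Nat) (dr dc : Int) : Nat → Int → Int → List (List Int) → List (List Int)
  | 0, _, _, out => out
  | fuel + 1, r, c, out =>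
    if 0 ≤ r ∧ r < (rows : Int) ∧ 0 ≤ c ∧ c < (cols : Int) then
      let out' := if pvCell out r.toNat c.toNat = bg
                  then out.set r.toNat ((out.getD r.toNat []).set c.toNat 6) else out
      pvWalk bg rows cols dr dc fuel (r + dr) (c + dc) out'
    else out

def transform (grid : List (List Int)) : List (List Int) :=
  let rows := grid.length
  let cols := (grid.headD []).length
  let bg := bgOf grid
  let markers := pvMarkers grid bg rows cols
  markers.foldl (fun out m =>
    pvDirs.foldl (fun out d =>
      pvWalk bg rows cols d.1 d.2 (rows + cols) ((m.1 : Int) + d.1) ((m.2.1 : Int) + d.2) out)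
      out) grid

-- ===== PORT B =====
-- one scan recording every marker's diagonal keys r-c and r+c into two sets
def pvDiagSets (grid : List (List Int)) (bg : Int) (rows cols : Nat) :
    PySem.Set Int × PySem.Set Int :=
  (List.range rows).foldl (fun p r =>
    (List.range cols).foldl (fun p c =>
      if pvCell grid r c ≠ bg then
        (PySem.Set.add p.1 ((r : Int) - (c : Int)), PySem.Set.add p.2 ((r : Int) + (c : Int)))
      else p) p) (PySem.Set.empty, PySem.Set.empty)

def transform_alt (grid : List (List Int)) : List (List Int) :=
  let rows := grid.length
  let cols := (grid.headD []).length
  let bg := bgOf grid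
  let ds := pvDiagSets grid bg rows cols
  grid.mapIdx (fun r row =>
    (List.range cols).foldl (fun new c =>
      if new.getD c 0 = bg ∧ (((r : Int) - (c : Int)) ∈ ds.1 ∨ ((r : Int) + (c : Int)) ∈ ds.2)
      then new.set c 6 else new) row)

-- ===== PRECONDITION & SPEC =====
-- exactly where the Python A returns: it raises IndexError on grid = [] (grid[0]), on a grid whose
-- rows are all empty (Counter(...).most_common(1)[0]), and on a row shorter than row 0 (grid[r][c]
-- with c < cols in the marker scan); B raises at the same places.
def Pre_transform (grid : List (List Int)) : Prop :=
  grid ≠ [] ∧ grid.flatten ≠ [] ∧ ∀ row ∈ grid, (grid.headD []).length ≤ row.length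
instance (grid : List (List Int)) : Decidable (Pre_transform grid) := by
  unfold Pre_transform; infer_instance

def pvWitness_transform : List (List Int) := [[0, 0, 0], [0, 3, 0], [0, 0, 0]]

def Spec_transform (grid : List (List Int)) (out : List (List Int)) : Prop := out = transform_alt grid
instance (grid : List (List Int)) (out : List (List Int)) : Decidable (Spec_transform grid out) := by
  unfold Spec_transform; infer_instance

-- ===== CLAIM (what is proved, stated in full; the proofs are below) =====
def Claim_equal_transform : Prop :=
  ∀ (grid : List (List Int)), Dom_transform grid → Pre_transform grid →
    Spec_transform grid (transform grid)

-- ===== LEMMAS AND PROOFS =====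

-- cells of grid recolored according to a Bool mask s (only background cells inside the cols window)
def pvFill (grid : List (List Int)) (bg : Int) (cols : Nat) (s : Nat → Nat → Bool) :
    List (List Int) :=
  grid.mapIdx (fun r row => row.mapIdx (fun c v =>
    if c < cols ∧ v = bg ∧ s r c = true then 6 else v))

-- the set of cells a ray walk visits (mirrors pvWalk's control flow)
def pvSeg (rows cols : Nat) (dr dc : Int) : Nat → Int → Int → Nat → Nat → Bool
  | 0, _, _, _, _ => false
  | fuel + 1, r, c, r', c' =>
    if 0 ≤ r ∧ r < (rows : Int) ∧ 0 ≤ c ∧ c < (cols : Int) then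
      (((r' : Int) == r) && ((c' : Int) == c)) ||
        pvSeg rows cols dr dc fuel (r + dr) (c + dc) r' c'
    else false

-- the set of cells the four ray walks out of marker m visit
def pvSegM (rows cols : Nat) (m : Nat × Nat × Int) (r' c' : Nat) : Bool :=
  pvDirs.any (fun d =>
    pvSeg rows cols d.1 d.2 (rows + cols) ((m.1 : Int) + d.1) ((m.2.1 : Int) + d.2) r' c')

def pvShape (grid : List (List Int)) (cols : Nat) : Prop := ∀ row ∈ grid, cols ≤ row.length

theorem pvCell_eq (g : List (List Int)) (r c : Nat) (hr : r < g.length)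
    (hc : c < (g[r]).length) : pvCell g r c = (g[r])[c] := by
  simp [pvCell, hr, hc]

theorem pvFill_ext (grid : List (List Int)) (bg : Int) (cols : Nat) (s s' : Nat → Nat → Bool)
    (h : ∀ r c : Nat, r < grid.length → c < cols → pvCell grid r c = bg → s r c = s' r c) :
    pvFill grid bg cols s = pvFill grid bg cols s' := by
  unfold pvFill
  apply List.ext_getElem (by simp)
  intro r h1 h2
  simp only [List.getElem_mapIdx]
  apply List.ext_getElem (by simp)
  intro c hc1 hc2
  simp only [List.getElem_mapIdx]
  simp only [List.length_mapIdx] at h1 hc1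
  by_cases h3 : c < cols ∧ (grid[r])[c] = bg
  · have := h r c h1 h3.1 (by rw [pvCell_eq grid r c h1 hc1]; exact h3.2)
    simp [this]
  · push Not at h3
    by_cases h4 : c < cols
    · simp [h4, h3 h4]
    · simp [h4]

theorem pvFill_false (grid : List (List Int)) (bg : Int) (cols : Nat) :
    pvFill grid bg cols (fun _ _ => false) = grid := by
  unfold pvFill
  apply List.ext_getElem (by simp)
  intro r h1 h2
  simp only [List.getElem_mapIdx]
  apply List.ext_getElem (by simp)
  intro c hc1 hc2
  simp

theorem pvFill_getCell (grid : List (List Int)) (bg : Int) (cols : Nat) (s : Nat → Nat → Bool)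
    (r c : Nat) (hr : r < grid.length) (hc : c < cols) (hsh : pvShape grid cols) :
    pvCell (pvFill grid bg cols s) r c =
      if pvCell grid r c = bg ∧ s r c = true then 6 else pvCell grid r c := by
  have hcr : c < (grid[r]).length := lt_of_lt_of_le hc (hsh _ (by simp))
  have hr' : r < (pvFill grid bg cols s).length := by simpa [pvFill] using hr
  have hcr' : c < ((pvFill grid bg cols s)[r]'(by simpa [pvFill] using hr)).length := by simp [pvFill, hcr]
  rw [pvCell_eq _ r c hr' hcr', pvCell_eq grid r c hr hcr]
  simp only [pvFill, List.getElem_mapIdx, hc]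
  by_cases h : (grid[r])[c] = bg ∧ s r c = true
  · simp [h]
  · rw [if_neg (by tauto), if_neg h]

theorem pvFill_set (grid : List (List Int)) (bg : Int) (cols : Nat) (s : Nat → Nat → Bool)
    (r c : Nat) (hr : r < grid.length) (hc : c < cols) (hsh : pvShape grid cols)
    (hbg : pvCell grid r c = bg) :
    (pvFill grid bg cols s).set r (((pvFill grid bg cols s).getD r []).set c 6) =
      pvFill grid bg cols (fun r' c' => s r' c' || (r' == r && c' == c)) := by
  have hcr : c < (grid[r]).length := lt_of_lt_of_le hc (hsh _ (by simp))
  have hr' : r < (pvFill grid bg cols s).length := by simpa [pvFill] using hr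
  rw [List.getD_eq_getElem _ [] hr']
  apply List.ext_getElem (by simp [pvFill])
  intro i h1 h2
  rw [List.getElem_set]
  by_cases hir : r = i
  · subst hir
    rw [if_pos rfl]
    simp only [pvFill, List.getElem_mapIdx]
    apply List.ext_getElem (by simp)
    intro j hj1 hj2
    rw [List.getElem_set]
    simp only [List.getElem_mapIdx]
    by_cases hjc : c = j
    · subst hjc
      rw [if_pos rfl, if_pos]
      refine ⟨hc, ?_, by simp⟩
      rw [← pvCell_eq grid r c hr hcr]; exact hbg
    · rw [if_neg hjc]
      have hjc2 : ¬ j = c := fun h => hjc h.symm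
      simp [hjc2]
  · rw [if_neg hir]
    simp only [pvFill, List.getElem_mapIdx]
    have hir2 : ¬ i = r := fun h => hir h.symm
    simp [hir2]

theorem pvWalk_fill (grid : List (List Int)) (bg : Int) (cols : Nat) (dr dc : Int)
    (hsh : pvShape grid cols) (fuel : Nat) (r c : Int) (s : Nat → Nat → Bool) :
    pvWalk bg grid.length cols dr dc fuel r c (pvFill grid bg cols s) =
      pvFill grid bg cols
        (fun r' c' => s r' c' || pvSeg grid.length cols dr dc fuel r c r' c') := by
  induction fuel generalizing r c s with
  | zero => simp [pvWalk, pvSeg]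
  | succ fuel ih =>
    rw [pvWalk]
    by_cases hb : 0 ≤ r ∧ r < (grid.length : Int) ∧ 0 ≤ c ∧ c < (cols : Int)
    · rw [if_pos hb]
      obtain ⟨h1, h2, h3, h4⟩ := hb
      have hrn : r.toNat < grid.length := by omega
      have hcn : c.toNat < cols := by omega
      -- the step is pvFill of the mask with (r.toNat, c.toNat) added
      have hstep :
          (if pvCell (pvFill grid bg cols s) r.toNat c.toNat = bg
            then (pvFill grid bg cols s).set r.toNat
              (((pvFill grid bg cols s).getD r.toNat []).set c.toNat 6)
            else pvFill grid bg cols s) =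
          pvFill grid bg cols (fun r' c' => s r' c' || (r' == r.toNat && c' == c.toNat)) := by
        rw [pvFill_getCell grid bg cols s _ _ hrn hcn hsh]
        by_cases hg : pvCell grid r.toNat c.toNat = bg
        · by_cases hs : s r.toNat c.toNat = true
          · -- already masked: cell shows 6
            by_cases h6 : (6 : Int) = bg
            · rw [if_pos (by simp [hg, hs, h6])]
              exact pvFill_set grid bg cols s _ _ hrn hcn hsh hg
            · rw [if_neg (show ¬ _ = bg by rw [if_pos ⟨hg, hs⟩]; exact fun h => h6 h)]
              apply pvFill_ext
              intro a b _ _ _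
              by_cases hab : a = r.toNat ∧ b = c.toNat
              · obtain ⟨ha, hbb⟩ := hab; subst ha; subst hbb; simp [hs]
              · rcases not_and_or.mp hab with h | h <;> simp [h]
          · rw [if_pos (by simp [hg, hs])]
            exact pvFill_set grid bg cols s _ _ hrn hcn hsh hg
        · rw [if_neg (show ¬ _ = bg by rw [if_neg (fun hh => hg hh.1)]; exact hg)]
          apply pvFill_ext
          intro a b _ _ hab
          by_cases h : a = r.toNat ∧ b = c.toNat
          · obtain ⟨ha, hbb⟩ := h; subst ha; subst hbb; exact absurd hab hg
          · rcases not_and_or.mp h with h | h <;> simp [h]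
      simp only [hstep]
      rw [ih]
      apply pvFill_ext
      intro a b _ _ _
      conv_rhs => rw [pvSeg]
      rw [if_pos ⟨h1, h2, h3, h4⟩]
      have : (((a : Int) == r) && ((b : Int) == c)) = ((a == r.toNat) && (b == c.toNat)) := by
        rw [Bool.eq_iff_iff]; simp only [Bool.and_eq_true, beq_iff_eq]; omega
      rw [this]
      cases s a b <;> cases (a == r.toNat) && (b == c.toNat) <;>
        cases pvSeg grid.length cols dr dc fuel (r + dr) (c + dc) a b <;> simp
    · rw [if_neg hb]
      apply pvFill_ext
      intro a b _ _ _
      conv_rhs => rw [pvSeg]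
      rw [if_neg hb]
      simp

theorem pvSeg_spec (rows cols : Nat) (dr dc : Int) (fuel : Nat) (r0 c0 : Int) (r' c' : Nat) :
    pvSeg rows cols dr dc fuel r0 c0 r' c' = true ↔
      ∃ k : Nat, k < fuel ∧ (r' : Int) = r0 + k * dr ∧ (c' : Int) = c0 + k * dc ∧
        ∀ j : Nat, j ≤ k →
          0 ≤ r0 + j * dr ∧ r0 + j * dr < (rows : Int) ∧
          0 ≤ c0 + j * dc ∧ c0 + j * dc < (cols : Int) := by
  induction fuel generalizing r0 c0 with
  | zero => simp [pvSeg]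
  | succ fuel ih =>
    rw [pvSeg]
    by_cases hb : 0 ≤ r0 ∧ r0 < (rows : Int) ∧ 0 ≤ c0 ∧ c0 < (cols : Int)
    · rw [if_pos hb]
      simp only [Bool.or_eq_true, Bool.and_eq_true, beq_iff_eq, ih]
      constructor
      · rintro (⟨h1, h2⟩ | ⟨k, hk, e1, e2, hall⟩)
        · refine ⟨0, by omega, by simpa using h1, by simpa using h2, ?_⟩
          intro j hj
          have : j = 0 := by omega
          subst this
          simpa using hb
        · refine ⟨k + 1, by omega, ?_, ?_, ?_⟩
          · rw [e1]; push_cast; ring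
          · rw [e2]; push_cast; ring
          · intro j hj
            rcases Nat.eq_zero_or_pos j with h0 | h0
            · subst h0; simpa using hb
            · obtain ⟨j', rfl⟩ : ∃ j', j = j' + 1 := ⟨j - 1, by omega⟩
              have h := hall j' (by omega)
              have er : r0 + ((j' + 1 : Nat) : Int) * dr = (r0 + dr) + (j' : Int) * dr := by
                push_cast; ring
              have ec : c0 + ((j' + 1 : Nat) : Int) * dc = (c0 + dc) + (j' : Int) * dc := by
                push_cast; ring
              rw [er, ec]
              exact h
      · rintro ⟨k, hk, e1, e2, hall⟩
        rcases Nat.eq_zero_or_pos k with h0 | h0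
        · subst h0
          left
          constructor
          · simpa using e1
          · simpa using e2
        · obtain ⟨k', rfl⟩ : ∃ k', k = k' + 1 := ⟨k - 1, by omega⟩
          right
          refine ⟨k', by omega, by rw [e1]; push_cast; ring, by rw [e2]; push_cast; ring, ?_⟩
          intro j hj
          have h := hall (j + 1) (by omega)
          have er : (r0 + dr) + (j : Int) * dr = r0 + ((j + 1 : Nat) : Int) * dr := by
            push_cast; ring
          have ec : (c0 + dc) + (j : Int) * dc = c0 + ((j + 1 : Nat) : Int) * dc := by
            push_cast; ring
          rw [er, ec]
          exact h
    · rw [if_neg hb]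
      simp only [Bool.false_eq_true, false_iff]
      rintro ⟨k, hk, e1, e2, hall⟩
      exact hb (by simpa using hall 0 (by omega))

theorem pvSegM_iff (rows cols : Nat) (mr mc : Nat) (v : Int) (r c : Nat)
    (hmr : mr < rows) (hmc : mc < cols) (hr : r < rows) (hc : c < cols) :
    pvSegM rows cols (mr, mc, v) r c = true ↔
      ((mr : Int) - mc = (r : Int) - c ∨ (mr : Int) + mc = (r : Int) + c) ∧ (r, c) ≠ (mr, mc) := by
  unfold pvSegM pvDirs
  simp only [List.any_cons, List.any_nil, Bool.or_eq_true, Bool.false_eq_true, or_false,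
    pvSeg_spec]
  constructor
  · rintro (⟨k, hk, e1, e2, hall⟩ | ⟨k, hk, e1, e2, hall⟩ | ⟨k, hk, e1, e2, hall⟩ |
      ⟨k, hk, e1, e2, hall⟩) <;>
      (simp only [mul_neg_one, mul_one] at e1 e2
       constructor
       · first
         | (left; omega)
         | (right; omega)
       · intro hpair
         obtain ⟨h1, h2⟩ := Prod.mk.injEq .. ▸ hpair
         omega)
  · rintro ⟨hdiag, hne⟩
    have hne' : ¬(r = mr ∧ c = mc) := by
      intro ⟨h1, h2⟩; exact hne (by rw [h1, h2])
    rcases hdiag with hd | hd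
    · rcases Nat.lt_or_ge mr r with hlt | hge
      · -- direction (1, 1), marker strictly above-left
        refine Or.inr (Or.inr (Or.inr ⟨r - mr - 1, by omega, ?_, ?_, ?_⟩))
        · simp only [mul_one]; omega
        · simp only [mul_one]; omega
        · intro j hj; simp only [mul_one]; omega
      · -- mr ≥ r; mr = r forces c = mc, excluded
        have hgt : r < mr := by omega
        refine Or.inl ⟨mr - r - 1, by omega, ?_, ?_, ?_⟩
        · simp only [mul_neg_one]; omega
        · simp only [mul_neg_one]; omega
        · intro j hj; simp only [mul_neg_one]; omega
    · rcases Nat.lt_or_ge mr r with hlt | hge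
      · -- direction (1, -1)
        refine Or.inr (Or.inr (Or.inl ⟨r - mr - 1, by omega, ?_, ?_, ?_⟩))
        · simp only [mul_one]; omega
        · simp only [mul_neg_one]; omega
        · intro j hj; simp only [mul_one, mul_neg_one]; omega
      · have hgt : r < mr := by omega
        refine Or.inr (Or.inl ⟨mr - r - 1, by omega, ?_, ?_, ?_⟩)
        · simp only [mul_neg_one]; omega
        · simp only [mul_one]; omega
        · intro j hj; simp only [mul_one, mul_neg_one]; omega

theorem mem_pvMarkers (grid : List (List Int)) (bg : Int) (rows cols : Nat)
    (m : Nat × Nat × Int) :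
    m ∈ pvMarkers grid bg rows cols ↔
      ∃ r < rows, ∃ c < cols, pvCell grid r c ≠ bg ∧ m = (r, c, pvCell grid r c) := by
  unfold pvMarkers
  have h1 : (List.range rows).foldl (fun acc r =>
      (List.range cols).foldl (fun acc c =>
        if pvCell grid r c ≠ bg then acc ++ [(r, c, pvCell grid r c)] else acc) acc)
      ([] : List (Nat × Nat × Int))
    = (List.range rows).foldl (fun acc r => acc ++ ((List.range cols).filter
        (fun c => decide (pvCell grid r c ≠ bg))).map (fun c => (r, c, pvCell grid r c))) [] := by
    apply PySem.List.foldl_congr_mem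
    intro acc r _
    exact PySem.List.foldl_append_ite (p := fun c => pvCell grid r c ≠ bg)
      (f := fun c => (r, c, pvCell grid r c)) _ _
  rw [h1, PySem.List.foldl_append_eq_flatMap]
  simp only [List.nil_append, List.mem_flatMap, List.mem_map, List.mem_filter,
    List.mem_range, decide_eq_true_eq]
  constructor
  · rintro ⟨r, hr, c, ⟨hc, hbg⟩, rfl⟩
    exact ⟨r, hr, c, hc, hbg, rfl⟩
  · rintro ⟨r, hr, c, hc, hbg, rfl⟩
    exact ⟨r, hr, c, ⟨hc, hbg⟩, rfl⟩

theorem mem_pvDiagSets_inner (grid : List (List Int)) (bg : Int) (r : Nat) (l : List Nat)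
    (p : PySem.Set Int × PySem.Set Int) (x : Int) :
    (x ∈ (l.foldl (fun p c =>
        if pvCell grid r c ≠ bg then
          (PySem.Set.add p.1 ((r : Int) - (c : Int)), PySem.Set.add p.2 ((r : Int) + (c : Int)))
        else p) p).1 ↔
      x ∈ p.1 ∨ ∃ c ∈ l, pvCell grid r c ≠ bg ∧ x = (r : Int) - (c : Int)) ∧
    (x ∈ (l.foldl (fun p c =>
        if pvCell grid r c ≠ bg then
          (PySem.Set.add p.1 ((r : Int) - (c : Int)), PySem.Set.add p.2 ((r : Int) + (c : Int)))
        else p) p).2 ↔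
      x ∈ p.2 ∨ ∃ c ∈ l, pvCell grid r c ≠ bg ∧ x = (r : Int) + (c : Int)) := by
  induction l generalizing p with
  | nil => simp
  | cons c0 l ih =>
    simp only [List.foldl_cons]
    by_cases h : pvCell grid r c0 ≠ bg
    · rw [if_pos h]
      obtain ⟨ih1, ih2⟩ := ih (PySem.Set.add p.1 ((r : Int) - c0), PySem.Set.add p.2 ((r : Int) + c0))
      constructor
      · rw [ih1]
        simp only [PySem.Set.mem_add, List.mem_cons]
        constructor
        · rintro ((hp | rfl) | ⟨c, hc, hbg, rfl⟩)
          · exact Or.inl hp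
          · exact Or.inr ⟨c0, Or.inl rfl, h, rfl⟩
          · exact Or.inr ⟨c, Or.inr hc, hbg, rfl⟩
        · rintro (hp | ⟨c, (rfl | hc), hbg, rfl⟩)
          · exact Or.inl (Or.inl hp)
          · exact Or.inl (Or.inr rfl)
          · exact Or.inr ⟨c, hc, hbg, rfl⟩
      · rw [ih2]
        simp only [PySem.Set.mem_add, List.mem_cons]
        constructor
        · rintro ((hp | rfl) | ⟨c, hc, hbg, rfl⟩)
          · exact Or.inl hp
          · exact Or.inr ⟨c0, Or.inl rfl, h, rfl⟩
          · exact Or.inr ⟨c, Or.inr hc, hbg, rfl⟩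
        · rintro (hp | ⟨c, (rfl | hc), hbg, rfl⟩)
          · exact Or.inl (Or.inl hp)
          · exact Or.inl (Or.inr rfl)
          · exact Or.inr ⟨c, hc, hbg, rfl⟩
    · rw [if_neg h]
      obtain ⟨ih1, ih2⟩ := ih p
      rw [ih1, ih2]
      constructor <;>
        (constructor
         · rintro (hp | ⟨c, hc, hbg, rfl⟩)
           · exact Or.inl hp
           · exact Or.inr ⟨c, List.mem_cons_of_mem _ hc, hbg, rfl⟩
         · rintro (hp | ⟨c, hc, hbg, rfl⟩)
           · exact Or.inl hp
           · rcases List.mem_cons.mp hc with rfl | hc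
             · exact absurd hbg h
             · exact Or.inr ⟨c, hc, hbg, rfl⟩)

theorem mem_pvDiagSets_outer (grid : List (List Int)) (bg : Int) (cols : Nat) (l : List Nat)
    (p : PySem.Set Int × PySem.Set Int) (x : Int) :
    (x ∈ (l.foldl (fun p r => (List.range cols).foldl (fun p c =>
        if pvCell grid r c ≠ bg then
          (PySem.Set.add p.1 ((r : Int) - (c : Int)), PySem.Set.add p.2 ((r : Int) + (c : Int)))
        else p) p) p).1 ↔
      x ∈ p.1 ∨ ∃ r ∈ l, ∃ c < cols, pvCell grid r c ≠ bg ∧ x = (r : Int) - (c : Int)) ∧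
    (x ∈ (l.foldl (fun p r => (List.range cols).foldl (fun p c =>
        if pvCell grid r c ≠ bg then
          (PySem.Set.add p.1 ((r : Int) - (c : Int)), PySem.Set.add p.2 ((r : Int) + (c : Int)))
        else p) p) p).2 ↔
      x ∈ p.2 ∨ ∃ r ∈ l, ∃ c < cols, pvCell grid r c ≠ bg ∧ x = (r : Int) + (c : Int)) := by
  induction l generalizing p with
  | nil => simp
  | cons r0 l ih =>
    simp only [List.foldl_cons]
    set p1 := (List.range cols).foldl (fun p c =>
        if pvCell grid r0 c ≠ bg then
          (PySem.Set.add p.1 ((r0 : Int) - (c : Int)), PySem.Set.add p.2 ((r0 : Int) + (c : Int)))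
        else p) p with hp1
    obtain ⟨ih1, ih2⟩ := ih p1
    obtain ⟨in1, in2⟩ := mem_pvDiagSets_inner grid bg r0 (List.range cols) p x
    rw [← hp1] at in1 in2
    simp only [List.mem_range] at in1 in2
    constructor
    · rw [ih1, in1]
      simp only [List.mem_cons]
      constructor
      · rintro ((hp | ⟨c, hc, hbg, rfl⟩) | ⟨r, hr, c, hc, hbg, rfl⟩)
        · exact Or.inl hp
        · exact Or.inr ⟨r0, Or.inl rfl, c, hc, hbg, rfl⟩
        · exact Or.inr ⟨r, Or.inr hr, c, hc, hbg, rfl⟩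
      · rintro (hp | ⟨r, (rfl | hr), c, hc, hbg, rfl⟩)
        · exact Or.inl (Or.inl hp)
        · exact Or.inl (Or.inr ⟨c, hc, hbg, rfl⟩)
        · exact Or.inr ⟨r, hr, c, hc, hbg, rfl⟩
    · rw [ih2, in2]
      simp only [List.mem_cons]
      constructor
      · rintro ((hp | ⟨c, hc, hbg, rfl⟩) | ⟨r, hr, c, hc, hbg, rfl⟩)
        · exact Or.inl hp
        · exact Or.inr ⟨r0, Or.inl rfl, c, hc, hbg, rfl⟩
        · exact Or.inr ⟨r, Or.inr hr, c, hc, hbg, rfl⟩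
      · rintro (hp | ⟨r, (rfl | hr), c, hc, hbg, rfl⟩)
        · exact Or.inl (Or.inl hp)
        · exact Or.inl (Or.inr ⟨c, hc, hbg, rfl⟩)
        · exact Or.inr ⟨r, hr, c, hc, hbg, rfl⟩

theorem mem_pvDiagSets_fst (grid : List (List Int)) (bg : Int) (rows cols : Nat) (x : Int) :
    x ∈ (pvDiagSets grid bg rows cols).1 ↔
      ∃ r < rows, ∃ c < cols, pvCell grid r c ≠ bg ∧ x = (r : Int) - (c : Int) := by
  unfold pvDiagSets
  rw [(mem_pvDiagSets_outer grid bg cols (List.range rows) _ x).1]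
  simp [PySem.Set.empty, List.mem_range]

theorem mem_pvDiagSets_snd (grid : List (List Int)) (bg : Int) (rows cols : Nat) (x : Int) :
    x ∈ (pvDiagSets grid bg rows cols).2 ↔
      ∃ r < rows, ∃ c < cols, pvCell grid r c ≠ bg ∧ x = (r : Int) + (c : Int) := by
  unfold pvDiagSets
  rw [(mem_pvDiagSets_outer grid bg cols (List.range rows) _ x).2]
  simp [PySem.Set.empty, List.mem_range]

theorem fold_dirs (grid : List (List Int)) (bg : Int) (cols : Nat)
    (hsh : pvShape grid cols) (m : Nat × Nat × Int) (s : Nat → Nat → Bool) :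
    pvDirs.foldl (fun out d =>
        pvWalk bg grid.length cols d.1 d.2 (grid.length + cols)
          ((m.1 : Int) + d.1) ((m.2.1 : Int) + d.2) out) (pvFill grid bg cols s)
    = pvFill grid bg cols (fun r' c' => s r' c' || pvSegM grid.length cols m r' c') := by
  simp only [pvDirs, List.foldl_cons, List.foldl_nil]
  rw [pvWalk_fill grid bg cols _ _ hsh, pvWalk_fill grid bg cols _ _ hsh,
    pvWalk_fill grid bg cols _ _ hsh, pvWalk_fill grid bg cols _ _ hsh]
  apply pvFill_ext
  intro a b _ _ _
  simp only [pvSegM, pvDirs, List.any_cons, List.any_nil, Bool.or_false, Bool.or_assoc]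

theorem fold_markers (grid : List (List Int)) (bg : Int) (cols : Nat)
    (hsh : pvShape grid cols) (ms : List (Nat × Nat × Int)) (s : Nat → Nat → Bool) :
    ms.foldl (fun out m =>
      pvDirs.foldl (fun out d =>
        pvWalk bg grid.length cols d.1 d.2 (grid.length + cols)
          ((m.1 : Int) + d.1) ((m.2.1 : Int) + d.2) out) out) (pvFill grid bg cols s)
    = pvFill grid bg cols
        (fun r' c' => s r' c' || ms.any (fun m => pvSegM grid.length cols m r' c')) := by
  induction ms generalizing s with
  | nil =>
    simp only [List.foldl_nil, List.any_nil, Bool.or_false]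
  | cons m ms ih =>
    rw [List.foldl_cons, fold_dirs grid bg cols hsh m s, ih]
    apply pvFill_ext
    intro a b _ _ _
    simp only [List.any_cons, Bool.or_assoc]

theorem transform_eq_fill (grid : List (List Int)) (hsh : pvShape grid (grid.headD []).length) :
    transform grid =
      pvFill grid (bgOf grid) (grid.headD []).length
        (fun r' c' =>
          (pvMarkers grid (bgOf grid) grid.length (grid.headD []).length).any
            (fun m => pvSegM grid.length (grid.headD []).length m r' c')) := by
  have h := fold_markers grid (bgOf grid) (grid.headD []).length hsh
    (pvMarkers grid (bgOf grid) grid.length (grid.headD []).length) (fun _ _ => false)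
  rw [pvFill_false] at h
  show (pvMarkers grid (bgOf grid) grid.length (grid.headD []).length).foldl _ grid = _
  rw [h]
  apply pvFill_ext
  intro a b _ _ _
  simp

theorem pvRowSweep (bg : Int) (P : Nat → Prop) [DecidablePred P] (row : List Int) (n : Nat)
    (hn : n ≤ row.length) :
    (List.range n).foldl (fun new c => if new.getD c 0 = bg ∧ P c then new.set c 6 else new) row
    = row.mapIdx (fun c v => if c < n ∧ v = bg ∧ P c then 6 else v) := by
  induction n with
  | zero =>
    simp only [List.range_zero, List.foldl_nil]
    apply List.ext_getElem (by simp)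
    intro j h1 h2
    simp
  | succ n ih =>
    rw [List.range_succ, List.foldl_append, ih (by omega), List.foldl_cons, List.foldl_nil]
    have hnl : n < row.length := by omega
    have hget : (row.mapIdx (fun c v => if c < n ∧ v = bg ∧ P c then 6 else v)).getD n 0
        = row[n] := by
      rw [List.getD_eq_getElem _ 0 (by simpa using hnl), List.getElem_mapIdx]
      simp
    rw [hget]
    by_cases hcond : row[n] = bg ∧ P n
    · rw [if_pos hcond]
      apply List.ext_getElem (by simp)
      intro j h1 h2
      rw [List.getElem_set]
      by_cases hj : n = j
      · subst hj
        rw [if_pos rfl, List.getElem_mapIdx, if_pos ⟨by omega, hcond.1, hcond.2⟩]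
      · rw [if_neg hj]
        simp only [List.getElem_mapIdx]
        have hlt : j < n ↔ j < n + 1 := by
          simp only [List.length_set, List.length_mapIdx] at h1
          omega
        simp only [hlt]
    · rw [if_neg hcond]
      apply List.ext_getElem (by simp)
      intro j h1 h2
      simp only [List.getElem_mapIdx]
      by_cases hj : n = j
      · subst hj
        rw [if_neg (by simp), if_neg (by intro h; exact hcond ⟨h.2.1, h.2.2⟩)]
      · have hlt : j < n ↔ j < n + 1 := by
          simp only [List.length_mapIdx] at h1
          omega
        simp only [hlt]

theorem transform_alt_eq_fill (grid : List (List Int))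
    (hsh : pvShape grid (grid.headD []).length) :
    transform_alt grid =
      pvFill grid (bgOf grid) (grid.headD []).length
        (fun r' c' =>
          decide (((r' : Int) - (c' : Int)) ∈
              (pvDiagSets grid (bgOf grid) grid.length (grid.headD []).length).1 ∨
            ((r' : Int) + (c' : Int)) ∈
              (pvDiagSets grid (bgOf grid) grid.length (grid.headD []).length).2)) := by
  show grid.mapIdx _ = _
  unfold pvFill
  apply List.ext_getElem (by simp)
  intro r h1 h2
  have hr : r < grid.length := by simp only [List.length_mapIdx] at h1; exact h1
  simp only [List.getElem_mapIdx]
  rw [pvRowSweep (bgOf grid)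
    (fun c => ((r : Int) - (c : Int)) ∈
        (pvDiagSets grid (bgOf grid) grid.length (grid.headD []).length).1 ∨
      ((r : Int) + (c : Int)) ∈
        (pvDiagSets grid (bgOf grid) grid.length (grid.headD []).length).2)
    (grid[r]'hr) (grid.headD []).length (hsh _ (List.getElem_mem hr))]
  apply List.ext_getElem (by simp)
  intro j hj1 hj2
  simp only [List.getElem_mapIdx, decide_eq_true_eq]

theorem transform_eq_alt (grid : List (List Int)) (hsh : pvShape grid (grid.headD []).length) :
    transform grid = transform_alt grid := by
  rw [transform_eq_fill grid hsh, transform_alt_eq_fill grid hsh]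
  apply pvFill_ext
  intro r c hr hc hbg
  rw [Bool.eq_iff_iff, List.any_eq_true, decide_eq_true_eq]
  constructor
  · rintro ⟨m, hm, hseg⟩
    obtain ⟨mr, hmr, mc, hmc, hmbg, rfl⟩ := (mem_pvMarkers _ _ _ _ _).mp hm
    obtain ⟨hd, -⟩ := (pvSegM_iff _ _ mr mc _ r c hmr hmc hr hc).mp hseg
    rcases hd with hd | hd
    · exact Or.inl ((mem_pvDiagSets_fst _ _ _ _ _).mpr ⟨mr, hmr, mc, hmc, hmbg, hd.symm⟩)
    · exact Or.inr ((mem_pvDiagSets_snd _ _ _ _ _).mpr ⟨mr, hmr, mc, hmc, hmbg, hd.symm⟩)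
  · rintro (hmem | hmem)
    · obtain ⟨mr, hmr, mc, hmc, hmbg, heq⟩ := (mem_pvDiagSets_fst _ _ _ _ _).mp hmem
      refine ⟨(mr, mc, pvCell grid mr mc),
        (mem_pvMarkers _ _ _ _ _).mpr ⟨mr, hmr, mc, hmc, hmbg, rfl⟩, ?_⟩
      refine (pvSegM_iff _ _ mr mc _ r c hmr hmc hr hc).mpr ⟨Or.inl heq.symm, ?_⟩
      intro hpair
      obtain ⟨h1, h2⟩ := Prod.mk.injEq .. ▸ hpair
      subst h1; subst h2
      exact hmbg hbg
    · obtain ⟨mr, hmr, mc, hmc, hmbg, heq⟩ := (mem_pvDiagSets_snd _ _ _ _ _).mp hmem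
      refine ⟨(mr, mc, pvCell grid mr mc),
        (mem_pvMarkers _ _ _ _ _).mpr ⟨mr, hmr, mc, hmc, hmbg, rfl⟩, ?_⟩
      refine (pvSegM_iff _ _ mr mc _ r c hmr hmc hr hc).mpr ⟨Or.inr heq.symm, ?_⟩
      intro hpair
      obtain ⟨h1, h2⟩ := Prod.mk.injEq .. ▸ hpair
      subst h1; subst h2
      exact hmbg hbg

-- ===== VERDICT (by name: the statement is the Claim_ definition above) =====
theorem transform_spec : Claim_equal_transform := by
  intro grid _hdom hpre
  unfold Spec_transform
  exact transform_eq_alt grid hpre.2.2
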